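-- pv_equiv track=rewrite | github.com/slimissa/CAGOULE | run_tests.py | _nodes
-- ===== SOURCE A (Python) =====
-- def _nodes(n, p):
--     seen, res = set(), []
--     for i in range(n):
--         v = (i * 7 + 3) % p
--         while v in seen or v == 0:
--             v = (v + 1) % p
--         res.append(v)
--         seen.add(v)
--     return res
-- ===== SOURCE B (Python) =====
-- def _nodes(n, p):
--     # Union-find "next free slot": occupied residues point (with path
--     # compression) at the next candidate, so probing runs skip in one hop.
--     parent = {}
--     res = []
--     for i in range(n):
--         v = (i * 7 + 3) % p
--         path = []
--         while v == 0 or v in parent: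
--             path.append(v)
--             v = parent[v] if v in parent else (v + 1) % p
--         for q in path:
--             parent[q] = v
--         res.append(v)
--         parent[v] = (v + 1) % p
--     return res
-- ===== Notes on version B (the rewrite author's own statement) =====
-- stated objective: alternative
-- what changed: Replaces A's seen-set with a union-find successor map with path compression, built by a recursive pass that conses the output: each occupied residue points at the next candidate slot, so a probe jumps over occupied runs in one hop instead of re-testing every residue against the set.
import Mathlib
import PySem

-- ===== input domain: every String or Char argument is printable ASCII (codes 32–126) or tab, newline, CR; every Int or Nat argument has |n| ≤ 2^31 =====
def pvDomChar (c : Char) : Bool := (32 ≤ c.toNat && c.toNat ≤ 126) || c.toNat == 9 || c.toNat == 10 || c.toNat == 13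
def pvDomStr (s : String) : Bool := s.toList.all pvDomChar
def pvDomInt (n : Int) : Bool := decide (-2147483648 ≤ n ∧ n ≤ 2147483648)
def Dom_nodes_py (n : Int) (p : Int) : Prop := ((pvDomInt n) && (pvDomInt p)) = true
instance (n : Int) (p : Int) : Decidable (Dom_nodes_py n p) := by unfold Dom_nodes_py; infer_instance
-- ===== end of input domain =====

-- B replaces A's seen-set linear probing by a union-find successor map with path
-- compression: each occupied residue points at the next candidate slot, so a probe
-- jumps over occupied runs in one hop (same return value on Pre_, different algorithm).

-- ===== PORT A =====
-- A's inner 'while v in seen or v == 0: v = (v + 1) % p', with fuel |p| + 1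
-- (proved sufficient under Pre_nodes_py; the fuel-exhausted branch is never reached there)
def probeA (p : Int) (seen : PySem.Set Int) : Nat → Int → Int
  | 0, v => v
  | fuel + 1, v =>
    if v ∈ seen ∨ v = 0 then probeA p seen fuel (PySem.Int.mod (v + 1) p) else v

-- one iteration of A's 'for i in range(n)' body over the state (seen, res)
def nodesAStep (p : Int) (st : PySem.Set Int × List Int) (i : Int) : PySem.Set Int × List Int :=
  let v := probeA p st.1 (p.natAbs + 1) (PySem.Int.mod (i * 7 + 3) p)
  (PySem.Set.add st.1 v, st.2 ++ [v])

def nodes_py (n : Int) (p : Int) : List Int :=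
  ((PySem.List.pyRange 0 n 1).foldl (nodesAStep p) (PySem.Set.empty, [])).2

-- ===== PORT B =====
-- B's inner 'while v == 0 or v in parent: path.append(v); v = parent[v] if v in parent else (v+1) % p',
-- with fuel n.toNat + 2 (proved sufficient under Pre_nodes_py)
def findB (p : Int) (parent : PySem.Dict Int Int) : Nat → Int → List Int → Int × List Int
  | 0, v, path => (v, path)
  | fuel + 1, v, path =>
    if v = 0 ∨ parent.contains v = true then
      findB p parent fuel (parent.getD v (PySem.Int.mod (v + 1) p)) (path ++ [v])
    else (v, path)

-- B's 'for i in range(n)' as recursion on the number of remaining iterations: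
-- find the free slot, compress the path, occupy the slot, cons the output
def nodesBGo (n p : Int) (parent : PySem.Dict Int Int) : Nat → Int → List Int
  | 0, _ => []
  | k + 1, i =>
    let r := findB p parent (n.toNat + 2) (PySem.Int.mod (i * 7 + 3) p) []
    let d := r.2.foldl (fun d q => d.insert q r.1) parent
    r.1 :: nodesBGo n p (d.insert r.1 (PySem.Int.mod (r.1 + 1) p)) k (i + 1)

def nodes_py_alt (n : Int) (p : Int) : List Int :=
  nodesBGo n p PySem.Dict.empty n.toNat 0

-- ===== PRECONDITION & SPEC =====
-- Pre_ excludes exactly the inputs where A does not return: p = 0 with n ≥ 1 raises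
-- ZeroDivisionError, and n ≥ |p| (with p ≠ 0, n ≥ 1) makes A's while-loop run forever
-- once all |p| - 1 nonzero residues are taken.
def Pre_nodes_py (n : Int) (p : Int) : Prop := n ≤ 0 ∨ (p ≠ 0 ∧ n < |p|)
instance (n : Int) (p : Int) : Decidable (Pre_nodes_py n p) := by unfold Pre_nodes_py; infer_instance

def pvWitness_nodes_py : Int × Int := (3, 5)

def Spec_nodes_py (n : Int) (p : Int) (out : List Int) : Prop := out = nodes_py_alt n p
instance (n : Int) (p : Int) (out : List Int) : Decidable (Spec_nodes_py n p out) := by unfold Spec_nodes_py; infer_instance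

-- ===== CLAIM (what is proved, stated in full; the proofs are below) =====
def Claim_equal_nodes_py : Prop :=
  ∀ (n : Int) (p : Int), Dom_nodes_py n p → Pre_nodes_py n p → Spec_nodes_py n p (nodes_py n p)

-- ===== LEMMAS AND PROOFS =====

-- the probing step (v + 1) % p iterated j times
def iterP (p : Int) (j : Nat) (v : Int) : Int := (fun w => PySem.Int.mod (w + 1) p)^[j] v

-- 'v in seen or v == 0', the occupancy test both loops decide
def OccP (seen : List Int) (w : Int) : Prop := w ∈ seen ∨ w = 0

-- w is a residue of % p
def Res (p w : Int) : Prop := PySem.Int.mod w p = w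

-- the relation between A's seen-set and B's parent map maintained across iterations
def GoodState (p : Int) (seen : List Int) (parent : PySem.Dict Int Int) : Prop :=
  seen.Nodup ∧
  (∀ x ∈ seen, Res p x ∧ x ≠ 0) ∧
  (∀ x ∈ seen, parent.contains x = true) ∧
  (∀ k, parent.contains k = true → k ∈ seen ∨ k = 0) ∧
  (∀ k u, parent.get? k = some u →
    ∃ j, 1 ≤ j ∧ u = iterP p j k ∧ ∀ l, l < j → OccP seen (iterP p l k))

lemma mod_dvd_sub (p x : Int) : p ∣ x - PySem.Int.mod x p :=
  ⟨PySem.Int.floordiv x p, by linarith [PySem.Int.floordiv_mul_add_mod x p]⟩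

lemma mod_unique (p x y : Int) (hp : p ≠ 0) (hdvd : p ∣ x - y)
    (h2 : 0 < p → 0 ≤ y ∧ y < p) (h3 : p < 0 → p < y ∧ y ≤ 0) :
    PySem.Int.mod x p = y := by
  have hm := mod_dvd_sub p x
  have hdvd2 : p ∣ PySem.Int.mod x p - y := by
    have h4 := dvd_sub hdvd hm
    have h5 : (x - y) - (x - PySem.Int.mod x p) = PySem.Int.mod x p - y := by ring
    rwa [h5] at h4
  have hz : PySem.Int.mod x p - y = 0 := by
    refine Int.eq_zero_of_abs_lt_dvd ((abs_dvd p _).mpr hdvd2) ?_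
    rcases lt_or_gt_of_ne hp with hneg | hpos
    · obtain ⟨hb1, hb2⟩ := PySem.Int.mod_neg_bounds x hneg
      obtain ⟨hy1, hy2⟩ := h3 hneg
      rw [abs_lt, abs_of_neg hneg]; omega
    · have h1 := PySem.Int.mod_nonneg x hpos
      have hl := PySem.Int.mod_lt x hpos
      obtain ⟨hy1, hy2⟩ := h2 hpos
      rw [abs_lt, abs_of_pos hpos]; omega
  omega

lemma mod_bounds_pos (p x : Int) (hpos : 0 < p) : 0 ≤ PySem.Int.mod x p ∧ PySem.Int.mod x p < p :=
  ⟨PySem.Int.mod_nonneg x hpos, PySem.Int.mod_lt x hpos⟩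

lemma mod_res (p a : Int) (hp : p ≠ 0) : Res p (PySem.Int.mod a p) := by
  unfold Res
  exact mod_unique p _ _ hp (by simp) (fun h => mod_bounds_pos p a h)
    (fun h => PySem.Int.mod_neg_bounds a h)

lemma mod_add_cancel (p a c : Int) (hp : p ≠ 0) :
    PySem.Int.mod (PySem.Int.mod a p + c) p = PySem.Int.mod (a + c) p := by
  refine mod_unique p _ _ hp ?_ (fun h => mod_bounds_pos p (a + c) h)
    (fun h => PySem.Int.mod_neg_bounds (a + c) h)
  have h1 := mod_dvd_sub p a
  have h2 := mod_dvd_sub p (a + c)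
  have h3 := dvd_sub h2 h1
  have h4 : (a + c - PySem.Int.mod (a + c) p) - (a - PySem.Int.mod a p) =
      PySem.Int.mod a p + c - PySem.Int.mod (a + c) p := by ring
  rwa [h4] at h3

lemma iterP_zero (p : Int) (v : Int) : iterP p 0 v = v := rfl

lemma iterP_succ (p : Int) (j : Nat) (v : Int) :
    iterP p (j + 1) v = PySem.Int.mod (iterP p j v + 1) p := by
  unfold iterP
  rw [Function.iterate_succ_apply']

lemma iterP_succ_inner (p : Int) (j : Nat) (v : Int) :
    iterP p (j + 1) v = iterP p j (PySem.Int.mod (v + 1) p) := by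
  unfold iterP
  rw [Function.iterate_succ_apply]

lemma iterP_mod (p a : Int) (hp : p ≠ 0) (j : Nat) :
    iterP p j (PySem.Int.mod a p) = PySem.Int.mod (a + j) p := by
  induction j with
  | zero => simp [iterP_zero]
  | succ j ih =>
    rw [iterP_succ, ih, mod_add_cancel p (a + j) 1 hp]
    push_cast
    ring_nf

lemma iterP_add (p : Int) (a b : Nat) (v : Int) :
    iterP p a (iterP p b v) = iterP p (a + b) v :=
  (Function.iterate_add_apply _ a b v).symm

lemma exists_free (p : Int) (hp : p ≠ 0) (seen : List Int) (hnd : seen.Nodup)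
    (h0 : (0 : Int) ∉ seen) (hlen : (seen.length : Int) + 1 < |p|) (a : Int) :
    ∃ j, j ≤ seen.length + 1 ∧ ¬ OccP seen (iterP p j (PySem.Int.mod a p)) := by
  by_contra hcon
  push_neg at hcon
  set L := seen.length with hL
  set f : Nat → Int := fun j => iterP p j (PySem.Int.mod a p) with hf
  have hfm : ∀ j : Nat, f j = PySem.Int.mod (a + j) p := fun j => iterP_mod p a hp j
  have hinj : Set.InjOn f (Finset.range (L + 2)) := by
    intro j hj l hl hjl
    simp only [Finset.coe_range, Set.mem_Iio] at hj hl
    have hd1 := mod_dvd_sub p (a + (j : Int))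
    have hd2 := mod_dvd_sub p (a + (l : Int))
    rw [← hfm] at hd1 hd2
    rw [hjl] at hd1
    have h3 := dvd_sub hd1 hd2
    have h4 : (a + (j : Int) - f l) - (a + (l : Int) - f l) = (j : Int) - l := by ring
    rw [h4] at h3
    have h5 : (j : Int) - l = 0 := by
      refine Int.eq_zero_of_abs_lt_dvd ((abs_dvd p _).mpr h3) ?_
      have hj' : (j : Int) ≤ L + 1 := by exact_mod_cast Nat.lt_succ_iff.mp hj
      have hl' : (l : Int) ≤ L + 1 := by exact_mod_cast Nat.lt_succ_iff.mp hl
      have hj0 : (0 : Int) ≤ j := Int.natCast_nonneg j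
      have hl0 : (0 : Int) ≤ l := Int.natCast_nonneg l
      rw [abs_lt]
      omega
    omega
  have hsub : (Finset.range (L + 2)).image f ⊆ ((0 : Int) :: seen).toFinset := by
    intro x hx
    simp only [Finset.mem_image] at hx
    obtain ⟨j, hj, rfl⟩ := hx
    have hocc := hcon j (by simpa using Nat.lt_succ_iff.mp (Finset.mem_range.mp hj))
    simp only [List.toFinset_cons, Finset.mem_insert, List.mem_toFinset]
    rcases hocc with h | h
    · exact Or.inr h
    · exact Or.inl h
  have hc1 : ((Finset.range (L + 2)).image f).card = L + 2 := by
    rw [Finset.card_image_of_injOn hinj, Finset.card_range]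
  have hc2 := Finset.card_le_card hsub
  have hc3 := List.toFinset_card_le ((0 : Int) :: seen)
  simp only [List.length_cons] at hc3
  omega

lemma probeA_spec (p : Int) (seen : PySem.Set Int) :
    ∀ (d : Nat) (fuel : Nat) (v : Int), (∀ l, l < d → OccP seen (iterP p l v)) →
      ¬ OccP seen (iterP p d v) → d < fuel → probeA p seen fuel v = iterP p d v := by
  intro d
  induction d with
  | zero =>
    intro fuel v _ hfree hfuel
    obtain ⟨f, rfl⟩ : ∃ f, fuel = f + 1 := ⟨fuel - 1, by omega⟩
    rw [iterP_zero] at hfree ⊢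
    unfold probeA
    unfold OccP at hfree
    rw [if_neg hfree]
  | succ d ih =>
    intro fuel v hocc hfree hfuel
    obtain ⟨f, rfl⟩ : ∃ f, fuel = f + 1 := ⟨fuel - 1, by omega⟩
    unfold probeA
    have h0 : OccP seen v := by simpa [iterP_zero] using hocc 0 (by omega)
    unfold OccP at h0
    rw [if_pos h0]
    rw [iterP_succ_inner]
    exact ih f (PySem.Int.mod (v + 1) p)
      (fun l hl => by rw [← iterP_succ_inner]; exact hocc (l + 1) (by omega))
      (by rw [← iterP_succ_inner]; exact hfree) (by omega)

lemma findB_spec (p : Int) (seen : List Int) (parent : PySem.Dict Int Int)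
    (hG : GoodState p seen parent) :
    ∀ (d : Nat) (v : Int) (fuel : Nat) (path : List Int),
      (∀ l, l < d → OccP seen (iterP p l v)) → ¬ OccP seen (iterP p d v) → d < fuel →
      (findB p parent fuel v path).1 = iterP p d v ∧
      ∀ q ∈ (findB p parent fuel v path).2, q ∈ path ∨
        (OccP seen q ∧ ∃ j, 1 ≤ j ∧ iterP p j q = iterP p d v ∧
          ∀ l, l < j → OccP seen (iterP p l q)) := by
  obtain ⟨hnd, hres, hc1, hc2, hchain⟩ := hG
  intro d
  induction d using Nat.strong_induction_on with
  | _ d IH =>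
  intro v fuel path hocc hfree hfuel
  obtain ⟨f, rfl⟩ : ∃ f, fuel = f + 1 := ⟨fuel - 1, by omega⟩
  by_cases hd : d = 0
  · subst hd
    rw [iterP_zero] at hfree ⊢
    have hcond : ¬ (v = 0 ∨ parent.contains v = true) := by
      intro h
      rcases h with h | h
      · exact hfree (Or.inr h)
      · rcases hc2 v h with h2 | h2
        · exact hfree (Or.inl h2)
        · exact hfree (Or.inr h2)
    unfold findB
    rw [if_neg hcond]
    exact ⟨rfl, fun q hq => Or.inl hq⟩
  · have hd1 : 1 ≤ d := by omega
    have h0 : OccP seen v := by simpa [iterP_zero] using hocc 0 (by omega)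
    have hcond : (v = 0 ∨ parent.contains v = true) := by
      rcases h0 with h | h
      · exact Or.inr (hc1 v h)
      · exact Or.inl h
    have hstep : ∃ j, 1 ≤ j ∧ parent.getD v (PySem.Int.mod (v + 1) p) = iterP p j v ∧
        ∀ l, l < j → OccP seen (iterP p l v) := by
      cases hget : parent.get? v with
      | some u =>
        obtain ⟨j, hj1, hj2, hj3⟩ := hchain v u hget
        refine ⟨j, hj1, ?_, hj3⟩
        rw [PySem.Dict.getD_eq_get?_getD, hget]
        exact hj2
      | none =>
        refine ⟨1, le_refl 1, ?_, ?_⟩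
        · rw [PySem.Dict.getD_eq_get?_getD, hget]
          simp [iterP_succ, iterP_zero]
        · intro l hl
          have : l = 0 := by omega
          subst this
          simpa [iterP_zero] using h0
    obtain ⟨j, hj1, hu, hocc_j⟩ := hstep
    have hjd : j ≤ d := by
      by_contra hlt
      exact hfree (hocc_j d (by omega))
    unfold findB
    rw [if_pos hcond, hu]
    have harg : ∀ l, l < d - j → OccP seen (iterP p l (iterP p j v)) := by
      intro l hl
      rw [iterP_add]
      exact hocc (l + j) (by omega)
    have hfree' : ¬ OccP seen (iterP p (d - j) (iterP p j v)) := by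
      rw [iterP_add]
      have hdj : d - j + j = d := by omega
      rw [hdj]
      exact hfree
    have hmain := IH (d - j) (by omega) (iterP p j v) f (path ++ [v]) harg hfree' (by omega)
    have hroot : iterP p (d - j) (iterP p j v) = iterP p d v := by
      rw [iterP_add]
      congr 1
      omega
    rw [hroot] at hmain
    refine ⟨hmain.1, ?_⟩
    intro q hq
    rcases hmain.2 q hq with hq2 | hq2
    · rcases List.mem_append.mp hq2 with h | h
      · exact Or.inl h
      · have hqv : q = v := by simpa using h
        subst hqv
        exact Or.inr ⟨h0, d, by omega, rfl, fun l hl => hocc l hl⟩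
    · exact Or.inr hq2

lemma get?_foldl_insert_const (path : List Int) (r : Int) :
    ∀ (d0 : PySem.Dict Int Int) (k : Int),
      (path.foldl (fun d q => d.insert q r) d0).get? k =
        if k ∈ path then some r else d0.get? k := by
  induction path with
  | nil => intro d0 k; simp
  | cons q rest ih =>
    intro d0 k
    simp only [List.foldl_cons, ih, List.mem_cons]
    by_cases hk : k ∈ rest <;> by_cases hq : k = q <;>
      simp [hk, hq, PySem.Dict.get?_insert]

lemma step_sim (n p : Int) (hp : p ≠ 0) (seen : List Int) (parent : PySem.Dict Int Int)
    (hG : GoodState p seen parent)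
    (hlen : (seen.length : Int) + 1 < |p|) (hB : seen.length + 1 < n.toNat + 2) (i : Int) :
    ∃ v, v ∉ seen ∧ v ≠ 0 ∧
      probeA p seen (p.natAbs + 1) (PySem.Int.mod (i * 7 + 3) p) = v ∧
      (findB p parent (n.toNat + 2) (PySem.Int.mod (i * 7 + 3) p) []).1 = v ∧
      GoodState p (seen ++ [v])
        (((findB p parent (n.toNat + 2) (PySem.Int.mod (i * 7 + 3) p) []).2.foldl
            (fun d q => d.insert q v) parent).insert v (PySem.Int.mod (v + 1) p)) := by
  have hGre : GoodState p seen parent := hG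
  obtain ⟨hnd, hres, hc1, hc2, hchain⟩ := hG
  have h0s : (0 : Int) ∉ seen := fun h => (hres 0 h).2 rfl
  set v0 := PySem.Int.mod (i * 7 + 3) p with hv0
  obtain ⟨j0, hj0, hj0f⟩ := exists_free p hp seen hnd h0s hlen (i * 7 + 3)
  have hex : ∃ j, ¬ OccP seen (iterP p j v0) := ⟨j0, hj0f⟩
  haveI : DecidablePred (fun j => ¬ OccP seen (iterP p j v0)) := fun j => by
    unfold OccP
    infer_instance
  set d := Nat.find hex with hdd
  have hdfree : ¬ OccP seen (iterP p d v0) := Nat.find_spec hex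
  have hdocc : ∀ l, l < d → OccP seen (iterP p l v0) := fun l hl =>
    not_not.mp (Nat.find_min hex hl)
  have hdle : d ≤ seen.length + 1 := le_trans (Nat.find_min' hex hj0f) hj0
  have hnatabs : seen.length + 1 < p.natAbs + 1 := by
    have h1 : (seen.length : Int) + 1 < (p.natAbs : Int) := by
      rwa [Int.abs_eq_natAbs] at hlen
    omega
  have hA := probeA_spec p seen d (p.natAbs + 1) v0 hdocc hdfree (by omega)
  have hB' := findB_spec p seen parent hGre d v0 (n.toNat + 2) [] hdocc hdfree (by omega)
  set r := findB p parent (n.toNat + 2) v0 [] with hr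
  set v := iterP p d v0 with hv
  have hvs : v ∉ seen := fun h => hdfree (Or.inl h)
  have hvz : v ≠ 0 := fun h => hdfree (Or.inr h)
  have hvres : Res p v := by
    rw [hv, hv0, iterP_mod p _ hp d]
    exact mod_res p _ hp
  have hroot : r.1 = v := hB'.1
  have hpath : ∀ q ∈ r.2, OccP seen q ∧ ∃ j, 1 ≤ j ∧ iterP p j q = v ∧
      ∀ l, l < j → OccP seen (iterP p l q) := by
    intro q hq
    rcases hB'.2 q hq with h | h
    · cases h
    · exact h
  refine ⟨v, hvs, hvz, hA, hroot, ?_⟩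
  -- GoodState for the updated state
  set npar := (r.2.foldl (fun d q => d.insert q v) parent).insert v
    (PySem.Int.mod (v + 1) p) with hnpar
  have hget : ∀ k, npar.get? k =
      if k = v then some (PySem.Int.mod (v + 1) p)
      else if k ∈ r.2 then some v else parent.get? k := by
    intro k
    rw [hnpar, PySem.Dict.get?_insert, get?_foldl_insert_const]
  have hoccmono : ∀ w, OccP seen w → OccP (seen ++ [v]) w := by
    intro w hw
    rcases hw with h | h
    · exact Or.inl (List.mem_append.mpr (Or.inl h))
    · exact Or.inr h
  refine ⟨?_, ?_, ?_, ?_, ?_⟩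
  · rw [List.nodup_append]
    refine ⟨hnd, List.nodup_singleton v, fun a ha b hb => ?_⟩
    rw [List.mem_singleton] at hb
    subst hb
    exact ne_of_mem_of_not_mem ha hvs
  · intro x hx
    rcases List.mem_append.mp hx with h | h
    · exact hres x h
    · have : x = v := by simpa using h
      subst this
      exact ⟨hvres, hvz⟩
  · intro x hx
    rw [PySem.Dict.contains_eq_isSome_get?, hget x]
    rcases List.mem_append.mp hx with h | h
    · by_cases h1 : x = v
      · simp [h1]
      · by_cases h2 : x ∈ r.2
        · simp [h1, h2]
        · have := hc1 x h
          rw [PySem.Dict.contains_eq_isSome_get?] at this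
          simp [h1, h2, this]
    · have : x = v := by simpa using h
      simp [this]
  · intro k hk
    rw [PySem.Dict.contains_eq_isSome_get?, hget k] at hk
    by_cases h1 : k = v
    · exact Or.inl (List.mem_append.mpr (Or.inr (by simp [h1])))
    · by_cases h2 : k ∈ r.2
      · rcases (hpath k h2).1 with h | h
        · exact Or.inl (List.mem_append.mpr (Or.inl h))
        · exact Or.inr h
      · simp only [h1, h2, if_false] at hk
        rw [← PySem.Dict.contains_eq_isSome_get?] at hk
        rcases hc2 k hk with h | h
        · exact Or.inl (List.mem_append.mpr (Or.inl h))
        · exact Or.inr h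
  · intro k u hk
    rw [hget k] at hk
    by_cases h1 : k = v
    · rw [if_pos h1] at hk
      refine ⟨1, le_refl 1, ?_, ?_⟩
      · cases hk
        simp [iterP_succ, iterP_zero, h1]
      · intro l hl
        have : l = 0 := by omega
        subst this
        rw [iterP_zero, h1]
        exact Or.inl (List.mem_append.mpr (Or.inr (by simp)))
    · rw [if_neg h1] at hk
      by_cases h2 : k ∈ r.2
      · rw [if_pos h2] at hk
        obtain ⟨hoq, j, hj1, hj2, hj3⟩ := hpath k h2
        cases hk
        exact ⟨j, hj1, hj2.symm, fun l hl => hoccmono _ (hj3 l hl)⟩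
      · rw [if_neg h2] at hk
        obtain ⟨j, hj1, hj2, hj3⟩ := hchain k u hk
        exact ⟨j, hj1, hj2, fun l hl => hoccmono _ (hj3 l hl)⟩

lemma main_ind (n p : Int) (hp : p ≠ 0) (hn0 : 0 ≤ n) (hnp : n < |p|) :
    ∀ (k : Nat) (i : Int) (seen : List Int) (parent : PySem.Dict Int Int) (res : List Int),
      GoodState p seen parent → seen.length + k ≤ n.toNat →
      ((PySem.List.pyRange i (i + (k : Int)) 1).foldl (nodesAStep p) (seen, res)).2 =
        res ++ nodesBGo n p parent k i := by
  intro k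
  induction k with
  | zero =>
    intro i seen parent res _ _
    rw [show i + ((0 : Nat) : Int) = i by omega, PySem.List.pyRange_one_eq_nil (le_refl i)]
    simp [nodesBGo]
  | succ k ih =>
    intro i seen parent res hG hlen
    have hc : ((n.toNat : Int)) = n := Int.toNat_of_nonneg hn0
    have hlen1 : (seen.length : Int) + 1 < |p| := by omega
    obtain ⟨v, hvs, hvz, hprobe, hroot, hG'⟩ :=
      step_sim n p hp seen parent hG hlen1 (by omega) i
    have hcons : PySem.List.pyRange i (i + ((k + 1 : Nat) : Int)) 1 =
        i :: PySem.List.pyRange (i + 1) (i + 1 + (k : Nat)) 1 := by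
      rw [PySem.List.pyRange_one_cons (by push_cast; omega)]
      congr 1
      push_cast
      ring_nf
    rw [hcons]
    simp only [List.foldl_cons]
    have hA : nodesAStep p (seen, res) i = (seen ++ [v], res ++ [v]) := by
      unfold nodesAStep
      simp only []
      rw [hprobe, PySem.Set.add_of_not_mem hvs]
    rw [hA]
    have hB : nodesBGo n p parent (k + 1) i =
        v :: nodesBGo n p
          (((findB p parent (n.toNat + 2) (PySem.Int.mod (i * 7 + 3) p) []).2.foldl
              (fun d q => d.insert q v) parent).insert v (PySem.Int.mod (v + 1) p))
          k (i + 1) := by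
      rw [show nodesBGo n p parent (k + 1) i =
          (findB p parent (n.toNat + 2) (PySem.Int.mod (i * 7 + 3) p) []).1 ::
            nodesBGo n p
              (((findB p parent (n.toNat + 2) (PySem.Int.mod (i * 7 + 3) p) []).2.foldl
                  (fun d q => d.insert q
                    (findB p parent (n.toNat + 2) (PySem.Int.mod (i * 7 + 3) p) []).1)
                  parent).insert
                (findB p parent (n.toNat + 2) (PySem.Int.mod (i * 7 + 3) p) []).1
                (PySem.Int.mod
                  ((findB p parent (n.toNat + 2) (PySem.Int.mod (i * 7 + 3) p) []).1 + 1) p))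
              k (i + 1) from rfl, hroot]
    rw [hB]
    have := ih (i + 1) (seen ++ [v])
      (((findB p parent (n.toNat + 2) (PySem.Int.mod (i * 7 + 3) p) []).2.foldl
          (fun d q => d.insert q v) parent).insert v (PySem.Int.mod (v + 1) p))
      (res ++ [v]) hG' (by simp; omega)
    rw [this]
    simp

-- ===== VERDICT (by name: the statement is the Claim_ definition above) =====
theorem nodes_py_spec : Claim_equal_nodes_py := by
  intro n p _ hpre
  unfold Spec_nodes_py nodes_py nodes_py_alt
  by_cases hn : n ≤ 0
  · rw [PySem.List.pyRange_one_eq_nil hn]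
    have : n.toNat = 0 := by omega
    rw [this]
    rfl
  · rcases hpre with h | ⟨hp, hlt⟩
    · exact absurd h hn
    · have hG0 : GoodState p [] PySem.Dict.empty := by
        refine ⟨List.nodup_nil, ?_, ?_, ?_, ?_⟩
        · intro x hx; cases hx
        · intro x hx; cases hx
        · intro k h
          rw [PySem.Dict.contains_empty] at h
          cases h
        · intro k u h
          rw [PySem.Dict.get?_empty] at h
          cases h
      have hmain := main_ind n p hp (by omega) hlt n.toNat 0 [] PySem.Dict.empty []
        hG0 (by simp)
      have hcast : (0 : Int) + (n.toNat : Int) = n := by omega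
      rw [hcast] at hmain
      simpa using hmain
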